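-- pv_equiv track=rewrite | github.com/Jazz23/CodeSlobCleanup | codebases/exclusion-test/main.py | global_excluded_func
-- ===== SOURCE A (Python) =====
-- def global_excluded_func(x):
--     res = 0
--     if x > 0:
--         if x < 10:
--             res = 1
--         elif x < 20:
--             res = 2
--         elif x < 30:
--             res = 3
--         else:
--             for i in range(x):
--                 if i % 2 == 0:
--                     res += i
--                 else:
--                     if i % 3 == 0:
--                         res -= i
--                     elif i % 5 == 0:
--                         res += 1
--                     else:
--                         res -= 1
--     elif x < -10:
--         if x > -20:
--             res = -1
--         else:
--             res = -2
--     else: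
--         res = 0
--     return res
-- ===== SOURCE B (Python) =====
-- def global_excluded_func(x):
--     if x <= 0:
--         return 0 if x >= -10 else (-1 if x > -20 else -2)
--     if x < 30:
--         return 1 if x < 10 else (2 if x < 20 else 3)
--     e = (x + 1) // 2          # evens below x, count
--     m = (x + 2) // 6          # odd multiples of 3 below x, count
--     c5 = (x + 24) // 30 + (x + 4) // 30   # i < x with i % 30 in {5, 25}
--     odds = x // 2             # odds below x, count
--     return e * (e - 1) - 3 * m * m + 2 * c5 - odds + m
-- ===== Notes on version B (the rewrite author's own statement) =====
-- stated objective: faster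
-- what changed: Replaces A's O(x) accumulation loop over range(x) with a closed-form computation: arithmetic-series sums and counts of each residue class (evens, odd multiples of 3, residues 5/25 mod 30) obtained by constant-time floor divisions.
import Mathlib
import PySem

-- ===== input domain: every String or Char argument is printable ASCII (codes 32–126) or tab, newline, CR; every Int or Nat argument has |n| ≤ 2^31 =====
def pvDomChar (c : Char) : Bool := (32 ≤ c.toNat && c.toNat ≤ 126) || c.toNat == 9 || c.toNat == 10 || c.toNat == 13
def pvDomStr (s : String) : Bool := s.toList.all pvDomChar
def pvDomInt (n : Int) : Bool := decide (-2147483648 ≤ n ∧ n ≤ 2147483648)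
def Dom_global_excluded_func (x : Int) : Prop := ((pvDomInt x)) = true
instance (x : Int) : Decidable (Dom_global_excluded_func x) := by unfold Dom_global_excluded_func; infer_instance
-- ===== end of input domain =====

-- B replaces A's O(x) accumulation loop by closed-form counts/series per residue class (evens, odd multiples of 3, residues 5/25 mod 30): objective = faster.


-- ===== PORT A =====
-- the body of A's for-loop
def pvStepA (res i : Int) : Int :=
  if PySem.Int.mod i 2 = 0 then res + i
  else if PySem.Int.mod i 3 = 0 then res - i
  else if PySem.Int.mod i 5 = 0 then res + 1
  else res - 1

def global_excluded_func (x : Int) : Int :=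
  if x > 0 then
    if x < 10 then 1
    else if x < 20 then 2
    else if x < 30 then 3
    else (PySem.List.pyRange 0 x 1).foldl pvStepA 0
  else if x < -10 then
    if x > -20 then -1 else -2
  else 0

-- ===== PORT B =====
def global_excluded_func_alt (x : Int) : Int :=
  if x ≤ 0 then
    if x ≥ -10 then 0 else if x > -20 then -1 else -2
  else if x < 30 then
    if x < 10 then 1 else if x < 20 then 2 else 3
  else
    let e := PySem.Int.floordiv (x + 1) 2
    let m := PySem.Int.floordiv (x + 2) 6
    let c5 := PySem.Int.floordiv (x + 24) 30 + PySem.Int.floordiv (x + 4) 30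
    let odds := PySem.Int.floordiv x 2
    e * (e - 1) - 3 * m * m + 2 * c5 - odds + m

-- ===== PRECONDITION & SPEC =====
def Spec_global_excluded_func (x : Int) (out : Int) : Prop := out = global_excluded_func_alt x
instance (x : Int) (out : Int) : Decidable (Spec_global_excluded_func x out) := by unfold Spec_global_excluded_func; infer_instance

-- ===== CLAIM (what is proved, stated in full; the proofs are below) =====
def Claim_equal_global_excluded_func : Prop := ∀ (x : Int), Dom_global_excluded_func x → Spec_global_excluded_func x (global_excluded_func x)

-- ===== LEMMAS AND PROOFS =====

-- B's closed form with floor division written as `Int./` (they agree for positive divisors)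
def pvG (n : Int) : Int :=
  (n + 1) / 2 * ((n + 1) / 2 - 1) - 3 * ((n + 2) / 6) * ((n + 2) / 6)
    + 2 * ((n + 24) / 30 + (n + 4) / 30) - n / 2 + (n + 2) / 6

lemma pvStep_G (N : Int) : pvStepA (pvG N) N = pvG (N + 1) := by
  unfold pvStepA
  rw [PySem.Int.mod_eq_emod_of_pos (by norm_num : (0:Int) < 2),
      PySem.Int.mod_eq_emod_of_pos (by norm_num : (0:Int) < 3),
      PySem.Int.mod_eq_emod_of_pos (by norm_num : (0:Int) < 5)]
  by_cases h2 : N % 2 = 0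
  · rw [if_pos h2]
    unfold pvG
    rw [show (N + 1 + 1) / 2 = (N + 1) / 2 + 1 from by omega,
        show (N + 1 + 2) / 6 = (N + 2) / 6 from by omega,
        show (N + 1 + 24) / 30 = (N + 24) / 30 from by omega,
        show (N + 1 + 4) / 30 = (N + 4) / 30 from by omega,
        show (N + 1) / 2 = N / 2 from by omega]
    have hn : N = 2 * (N / 2) := by omega
    linear_combination hn
  · rw [if_neg h2]
    by_cases h3 : N % 3 = 0
    · rw [if_pos h3]
      unfold pvG
      rw [show (N + 1 + 1) / 2 = (N + 1) / 2 from by omega,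
          show (N + 1 + 2) / 6 = (N + 2) / 6 + 1 from by omega,
          show (N + 1 + 24) / 30 = (N + 24) / 30 from by omega,
          show (N + 1 + 4) / 30 = (N + 4) / 30 from by omega,
          show (N + 1) / 2 = N / 2 + 1 from by omega]
      have hn : N = 6 * ((N + 2) / 6) + 3 := by omega
      linear_combination -hn
    · rw [if_neg h3]
      by_cases h5 : N % 5 = 0
      · rw [if_pos h5]
        unfold pvG
        have h2' : N % 2 = 1 := by omega
        have h3' : N % 3 = 1 ∨ N % 3 = 2 := by omega
        have h30 : N % 30 = 5 ∨ N % 30 = 25 := by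
          rcases h3' with h | h <;> omega
        have hm : (N + 1 + 2) / 6 = (N + 2) / 6 := by
          rcases h3' with h | h <;> omega
        have hc : (N + 1 + 24) / 30 + (N + 1 + 4) / 30 = (N + 24) / 30 + (N + 4) / 30 + 1 := by
          rcases h30 with h | h <;> omega
        rw [hc, show (N + 1 + 1) / 2 = (N + 1) / 2 from by omega, hm,
            show (N + 1) / 2 = N / 2 + 1 from by omega]
        ring
      · rw [if_neg h5]
        unfold pvG
        rw [show (N + 1 + 1) / 2 = (N + 1) / 2 from by omega,
            show (N + 1 + 2) / 6 = (N + 2) / 6 from by omega,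
            show (N + 1 + 24) / 30 = (N + 24) / 30 from by omega,
            show (N + 1 + 4) / 30 = (N + 4) / 30 from by omega,
            show (N + 1) / 2 = N / 2 + 1 from by omega]
        ring

lemma pvLoop_eq (n : Nat) :
    (PySem.List.pyRange 0 (n : Int) 1).foldl pvStepA 0 = pvG (n : Int) := by
  induction n with
  | zero => decide
  | succ k ih =>
    rw [show ((k + 1 : Nat) : Int) = (k : Int) + 1 from by push_cast; ring,
        PySem.List.pyRange_one_succ_right (by omega : (0:Int) ≤ (k : Int)),
        List.foldl_append]
    simp only [List.foldl_cons, List.foldl_nil]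
    rw [ih]
    exact pvStep_G (k : Int)

-- ===== VERDICT (by name: the statement is the Claim_ definition above) =====
theorem global_excluded_func_spec : Claim_equal_global_excluded_func := by
  intro x _
  unfold Spec_global_excluded_func global_excluded_func global_excluded_func_alt
  by_cases h : 30 ≤ x
  · rw [if_pos (by omega : x > 0), if_neg (by omega : ¬ x < 10),
        if_neg (by omega : ¬ x < 20), if_neg (by omega : ¬ x < 30),
        if_neg (by omega : ¬ x ≤ 0), if_neg (by omega : ¬ x < 30)]
    obtain ⟨n, rfl⟩ : ∃ n : Nat, x = (n : Int) := ⟨x.toNat, by omega⟩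
    rw [pvLoop_eq n]
    simp only [PySem.Int.floordiv_eq_ediv_of_pos (by norm_num : (0:Int) < 2),
               PySem.Int.floordiv_eq_ediv_of_pos (by norm_num : (0:Int) < 6),
               PySem.Int.floordiv_eq_ediv_of_pos (by norm_num : (0:Int) < 30)]
    unfold pvG
    ring
  · split_ifs <;> omega
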